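-- pv_equiv track=rewrite | github.com/DTDevelop/ProjectEuler | Problems11-20/Problem11.py | greatest_product_of_row
-- ===== SOURCE A (Python) =====
-- def greatest_product_of_row(matrix, adjacent):
--     """
--     given matrix and number of adjacent
--     return greatest product of row
--     """
--     greatest_product = 0
--
--     matrix_length = len(matrix)
--
--     for col in range(matrix_length):
--         for num in range(matrix_length): # relative number to compare
--             if num + adjacent > matrix_length: # not enough values in direction to compare
--                 break # move to next row
--             new_product = 1
--             for inc in range(adjacent): # calculating product
--                 new_product *= matrix[col][num+inc]
--             if new_product > greatest_product:
--                 greatest_product = new_product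
--     return greatest_product
-- ===== SOURCE B (Python) =====
-- def greatest_product_of_row(matrix, adjacent):
--     """
--     given matrix and number of adjacent
--     return greatest product of row
--     """
--     n = len(matrix)
--     if adjacent > n:
--         return 0
--     best = 0
--     for row in matrix:
--         prod = 1
--         zeros = 0
--         for i in range(n):
--             x = row[i]
--             if x == 0:
--                 zeros += 1
--             else:
--                 prod *= x
--             if i >= adjacent:
--                 y = row[i - adjacent]
--                 if y == 0:
--                     zeros -= 1
--                 else:
--                     prod //= y
--             if i >= adjacent - 1:
--                 cand = prod if zeros == 0 else 0
--                 if cand > best: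
--                     best = cand
--     return best
-- ===== Notes on version B (the rewrite author's own statement) =====
-- stated objective: alternative
-- what changed: Replaced A's recomputation of each length-k window product by an inner loop with a single sliding-window pass per row that maintains a running product of the nonzero window elements plus a zero counter (dividing out the element that leaves the window).
-- outside the precondition, e.g. on greatest_product_of_row([[2]], -1): A returns 1, B raises IndexError
import Mathlib
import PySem

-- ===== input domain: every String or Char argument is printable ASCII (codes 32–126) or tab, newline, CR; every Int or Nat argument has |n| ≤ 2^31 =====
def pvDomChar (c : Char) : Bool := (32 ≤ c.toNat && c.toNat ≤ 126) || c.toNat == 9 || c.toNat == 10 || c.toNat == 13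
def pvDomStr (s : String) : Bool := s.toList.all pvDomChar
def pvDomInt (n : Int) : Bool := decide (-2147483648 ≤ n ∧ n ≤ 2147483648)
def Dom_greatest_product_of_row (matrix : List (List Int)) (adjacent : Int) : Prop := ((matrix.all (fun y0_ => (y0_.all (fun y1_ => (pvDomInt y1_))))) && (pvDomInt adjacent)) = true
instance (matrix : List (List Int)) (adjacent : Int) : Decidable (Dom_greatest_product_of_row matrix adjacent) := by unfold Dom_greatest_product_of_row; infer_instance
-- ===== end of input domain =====

-- B replaces A's per-window inner product loop by one sliding-window pass per row
-- (running product of the nonzero window elements + a zero counter); objective: alternative.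

-- ===== PORT A =====
-- for inc in range(adjacent): new_product *= matrix[col][num+inc]
def aIncLoop (row : List Int) (num adjacent : Int) : Int :=
  (PySem.List.pyRange 0 adjacent 1).foldl (fun p inc => p * PySem.List.pyGetD row (num + inc) 0) 1

-- for num in range(matrix_length): … with the 'break' on num + adjacent > matrix_length
def aNumLoop (row : List Int) (n adjacent : Int) (nums : List Int) (g : Int) : Int :=
  match nums with
  | [] => g
  | num :: rest =>
    if num + adjacent > n then g
    else
      let np := aIncLoop row num adjacent
      aNumLoop row n adjacent rest (if np > g then np else g)

def greatest_product_of_row (matrix : List (List Int)) (adjacent : Int) : Int :=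
  let n : Int := matrix.length
  (PySem.List.pyRange 0 n 1).foldl
    (fun g col => aNumLoop (PySem.List.pyGetD matrix col []) n adjacent (PySem.List.pyRange 0 n 1) g) 0

-- ===== PORT B =====
-- one iteration of B's inner loop; state = (prod, zeros, best)
def bStep (row : List Int) (adjacent : Int) (st : Int × Int × Int) (i : Int) : Int × Int × Int :=
  let prod := st.1
  let zeros := st.2.1
  let best := st.2.2
  let x := PySem.List.pyGetD row i 0
  let pz1 : Int × Int := if x = 0 then (prod, zeros + 1) else (prod * x, zeros)
  let pz2 : Int × Int :=
    if i ≥ adjacent then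
      let y := PySem.List.pyGetD row (i - adjacent) 0
      if y = 0 then (pz1.1, pz1.2 - 1) else (PySem.Int.floordiv pz1.1 y, pz1.2)
    else pz1
  let best2 :=
    if i ≥ adjacent - 1 then
      let cand := if pz2.2 = 0 then pz2.1 else 0
      if cand > best then cand else best
    else best
  (pz2.1, pz2.2, best2)

def greatest_product_of_row_alt (matrix : List (List Int)) (adjacent : Int) : Int :=
  let n : Int := matrix.length
  if adjacent > n then 0
  else
    matrix.foldl (fun best row =>
      ((PySem.List.pyRange 0 n 1).foldl (bStep row adjacent) (1, 0, best)).2.2) 0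

-- ===== PRECONDITION & SPEC =====
-- Pre_ restricts to the natural domain: a non-negative window size (for adjacent < 0,
-- outside the natural domain, A accidentally returns 1 — the empty product — while B's
-- sliding window would pop indices that were never pushed and raise IndexError), and,
-- whenever the windows are actually scanned (adjacent ≤ len(matrix)), rows of length at
-- least len(matrix) — on shorter rows A raises IndexError.
def Pre_greatest_product_of_row (matrix : List (List Int)) (adjacent : Int) : Prop :=
  0 ≤ adjacent ∧ (adjacent ≤ (matrix.length : Int) → ∀ row ∈ matrix, matrix.length ≤ row.length)
instance (matrix : List (List Int)) (adjacent : Int) : Decidable (Pre_greatest_product_of_row matrix adjacent) := by unfold Pre_greatest_product_of_row; infer_instance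

def pvWitness_greatest_product_of_row : List (List Int) × Int := ([[1, 2], [3, 4]], 2)

def Spec_greatest_product_of_row (matrix : List (List Int)) (adjacent : Int) (out : Int) : Prop := out = greatest_product_of_row_alt matrix adjacent
instance (matrix : List (List Int)) (adjacent : Int) (out : Int) : Decidable (Spec_greatest_product_of_row matrix adjacent out) := by unfold Spec_greatest_product_of_row; infer_instance

-- ===== CLAIM (what is proved, stated in full; the proofs are below) =====
def Claim_equal_greatest_product_of_row : Prop := ∀ (matrix : List (List Int)) (adjacent : Int), Dom_greatest_product_of_row matrix adjacent → Pre_greatest_product_of_row matrix adjacent → Spec_greatest_product_of_row matrix adjacent (greatest_product_of_row matrix adjacent)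

-- ===== LEMMAS AND PROOFS =====

-- the running-max step both programs use
def maxstep (g p : Int) : Int := if p > g then p else g

-- the list of all window products of a row (windows of size k ending at i = k-1 … n-1,
-- written with Nat subtraction so that k = 0 yields n empty windows of product 1)
def cands (row : List Int) (n k : Nat) : List Int :=
  (List.range' (k - 1) (n - (k - 1))).map (fun i => ((row.drop (i + 1 - k)).take k).prod)

-- B's sliding window at time i, and its two maintained statistics
def win (row : List Int) (k i : Nat) : List Int := (row.drop (i - k)).take (i - (i - k))
def stat1 (w : List Int) : Int := (w.filter (fun x => x ≠ 0)).prod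
def stat2 (w : List Int) : Int := ((w.count 0 : Nat) : Int)

theorem foldl_id {a b : Type} (l : List b) (init : a) : l.foldl (fun g _ => g) init = init := by
  induction l generalizing init with
  | nil => rfl
  | cons x t ih => simp only [List.foldl]; exact ih init

-- "product of the nonzero elements, or 0 if the window holds a zero" IS the window product
theorem candEq (w : List Int) :
    (if stat2 w = 0 then stat1 w else 0) = w.prod := by
  by_cases h : (0 : Int) ∈ w
  · have hc : w.count 0 ≠ 0 := by
      have := List.count_pos_iff.mpr h
      omega
    rw [if_neg (by simp [stat2]; omega), (List.prod_eq_zero h).symm]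
  · have hc : w.count 0 = 0 := by
      simpa [List.count_eq_zero] using h
    rw [if_pos (by simp [stat2, hc]), stat1, List.filter_eq_self.mpr ?_]
    intro x hx
    simp only [decide_eq_true_eq, ne_eq]
    exact fun h0 => h (h0 ▸ hx)

-- A's inner product loop computes the window product
theorem aIncLoop_eq (row : List Int) (s k : Nat) (h : s + k ≤ row.length) :
    aIncLoop row (s : Int) (k : Int) = ((row.drop s).take k).prod := by
  induction k with
  | zero => simp [aIncLoop, PySem.List.pyRange_one_eq_nil]
  | succ k ih =>
    have hk : s + k ≤ row.length := by omega
    have hcast : ((k + 1 : Nat) : Int) = (k : Int) + 1 := by push_cast; ring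
    have hget : PySem.List.pyGetD row ((s : Int) + (k : Int)) 0 = row[s + k]'(by omega) := by
      rw [show ((s : Int) + (k : Int)) = ((s + k : Nat) : Int) by push_cast; ring,
        PySem.List.pyGetD_natCast]
      exact List.getD_eq_getElem _ _ (by omega)
    rw [aIncLoop, hcast, PySem.List.pyRange_one_succ_right (by positivity), List.foldl_append]
    have hpre : (PySem.List.pyRange 0 (k : Int) 1).foldl
        (fun p inc => p * PySem.List.pyGetD row ((s : Int) + inc) 0) 1
        = aIncLoop row (s : Int) (k : Int) := rfl
    rw [hpre, ih hk, List.foldl_cons, List.foldl_nil, hget,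
      List.prod_take_succ _ k (by simpa using by omega), List.getElem_drop]

-- A's num-loop over a break-free prefix is a fold of maxstep
theorem aNumLoop_append (row : List Int) (n adjacent : Int) (l1 l2 : List Int) (g : Int)
    (h : ∀ num ∈ l1, ¬ num + adjacent > n) :
    aNumLoop row n adjacent (l1 ++ l2) g
      = aNumLoop row n adjacent l2
          (l1.foldl (fun g num => maxstep g (aIncLoop row num adjacent)) g) := by
  induction l1 generalizing g with
  | nil => rfl
  | cons a t ih =>
    rw [List.cons_append, aNumLoop, if_neg (h a (by simp))]
    rw [ih _ (fun x hx => h x (by simp [hx]))]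
    rfl

-- A's per-row loop equals the fold of maxstep over the window products
theorem aRow_eq (row : List Int) (n k : Nat) (g : Int) (hk : k ≤ n) (hn : n ≤ row.length) :
    aNumLoop row (n : Int) (k : Int) (PySem.List.pyRange 0 (n : Int) 1) g
      = (cands row n k).foldl maxstep g := by
  have hp : n - (k - 1) ≤ n := Nat.sub_le _ _
  have hsplit : PySem.List.pyRange 0 (n : Int) 1
      = PySem.List.pyRange 0 ((n - (k - 1) : Nat) : Int) 1
        ++ PySem.List.pyRange ((n - (k - 1) : Nat) : Int) (n : Int) 1 :=
    PySem.List.pyRange_one_append _ _ _ (by positivity) (by exact_mod_cast hp)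
  rw [hsplit, aNumLoop_append _ _ _ _ _ _ ?hnb]
  case hnb =>
    intro num hmem
    rw [PySem.List.mem_pyRange_one] at hmem
    omega
  have hstop : ∀ g' : Int,
      aNumLoop row (n : Int) (k : Int)
        (PySem.List.pyRange ((n - (k - 1) : Nat) : Int) (n : Int) 1) g' = g' := by
    intro g'
    by_cases hlt : ((n - (k - 1) : Nat) : Int) < (n : Int)
    · rw [PySem.List.pyRange_one_cons hlt, aNumLoop, if_pos (by omega)]
    · rw [PySem.List.pyRange_one_eq_nil (by omega)]; rfl
  rw [hstop, PySem.List.pyRange_zero_natCast, List.foldl_map, cands,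
    List.range'_eq_map_range, List.foldl_map, List.foldl_map]
  refine PySem.List.foldl_congr_mem _ _ _ _ ?_
  intro acc s hs
  rw [List.mem_range] at hs
  have hsk : s + k ≤ row.length := by omega
  rw [aIncLoop_eq row s k hsk]
  rcases Nat.eq_zero_or_pos k with hk0 | hk1
  · simp [hk0]
  · rw [show k - 1 + s + 1 - k = s from by omega]

-- window statistics under a push at the back and a pop at the front
theorem stat1_append (w : List Int) (x : Int) :
    stat1 (w ++ [x]) = if x = 0 then stat1 w else stat1 w * x := by
  unfold stat1
  rw [List.filter_append]
  by_cases hx : x = 0 <;> simp [hx]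

theorem stat2_append (w : List Int) (x : Int) :
    stat2 (w ++ [x]) = if x = 0 then stat2 w + 1 else stat2 w := by
  unfold stat2
  rw [List.count_append]
  by_cases hx : x = 0 <;> simp [hx]

theorem stat1_cons (y : Int) (t : List Int) :
    stat1 (y :: t) = if y = 0 then stat1 t else y * stat1 t := by
  unfold stat1
  by_cases hy : y = 0 <;> simp [hy]

theorem stat2_cons (y : Int) (t : List Int) :
    stat2 (y :: t) = if y = 0 then stat2 t + 1 else stat2 t := by
  unfold stat2
  by_cases hy : y = 0 <;> simp [hy]

-- exact division of the running product by the element leaving the window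
theorem fdiv_cancel (y a : Int) (h : y ≠ 0) : PySem.Int.floordiv (y * a) y = a := by
  unfold PySem.Int.floordiv
  rw [Int.mul_fdiv_cancel_left a h]

theorem fdiv_cancel' (a y : Int) (h : y ≠ 0) : PySem.Int.floordiv (a * y) y = a := by
  rw [mul_comm]
  exact fdiv_cancel y a h

theorem fdiv_self (y : Int) (h : y ≠ 0) : PySem.Int.floordiv y y = 1 := by
  have h1 := fdiv_cancel y 1 h
  rwa [mul_one] at h1

theorem fdiv_cancel_mid (a b y : Int) (h : y ≠ 0) :
    PySem.Int.floordiv (a * (b * y)) y = a * b := by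
  rw [← mul_assoc]
  exact fdiv_cancel' (a * b) y h

-- one step of B's sliding window, stated on the window statistics
theorem bStep_eq (row : List Int) (n k : Nat) (hk : k ≤ n) (hn : n ≤ row.length) (i : Nat)
    (hi : i < n) (B : Int) :
    bStep row (k : Int) (stat1 (win row k i), stat2 (win row k i), B) (i : Int)
      = (stat1 (win row k (i + 1)), stat2 (win row k (i + 1)),
         if k ≤ i + 1 then maxstep B ((win row k (i + 1)).prod) else B) := by
  have hlen : i < row.length := by omega
  have hget : PySem.List.pyGetD row (i : Int) 0 = row[i] := by
    rw [PySem.List.pyGetD_natCast]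
    exact List.getD_eq_getElem _ _ hlen
  rcases Nat.lt_or_ge i k with hik | hik
  · -- i < k : the element is pushed, nothing is popped
    have hnp : ¬ ((i : Int) ≥ (k : Int)) := by omega
    have hw1 : win row k (i + 1) = win row k i ++ [row[i]] := by
      unfold win
      rw [show i + 1 - k = 0 from by omega, show i - k = 0 from by omega]
      simp only [Nat.sub_zero, List.drop_zero]
      exact List.take_succ_eq_append_getElem hlen
    by_cases hem : k ≤ i + 1
    · have hem' : ((i : Int) ≥ (k : Int) - 1) := by omega
      rw [if_pos hem]
      conv_rhs => rw [← candEq (win row k (i + 1))]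
      rw [hw1, stat1_append, stat2_append]
      by_cases hx : row[i] = 0 <;>
        simp [bStep, hget, hx, hnp, hem', maxstep]
    · have hem' : ¬ ((i : Int) ≥ (k : Int) - 1) := by omega
      rw [if_neg hem, hw1, stat1_append, stat2_append]
      by_cases hx : row[i] = 0 <;>
        simp [bStep, hget, hx, hnp, hem']
  · -- k ≤ i : the element is pushed and the front of the window is popped
    have hpp : ((i : Int) ≥ (k : Int)) := by omega
    have hem' : ((i : Int) ≥ (k : Int) - 1) := by omega
    have hem : k ≤ i + 1 := by omega
    rw [if_pos hem]
    have hyget : PySem.List.pyGetD row ((i : Int) - (k : Int)) 0 = row[i - k]'(by omega) := by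
      rw [show (i : Int) - (k : Int) = ((i - k : Nat) : Int) from by push_cast [Nat.cast_sub hik]; ring,
        PySem.List.pyGetD_natCast]
      exact List.getD_eq_getElem _ _ (by omega)
    rcases Nat.eq_zero_or_pos k with hk0 | hk1
    · -- k = 0 : the popped element is the one just pushed
      subst hk0
      have hw : win row 0 i = [] := by
        unfold win
        simp
      have hw' : win row 0 (i + 1) = [] := by
        unfold win
        simp
      by_cases hx : row[i] = 0
      · simp [bStep, hget, hx, hw, hw', stat1, stat2, maxstep]
      · simp [bStep, hget, hx, hw, hw', stat1, stat2, maxstep, fdiv_self]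
    · -- k ≥ 1 : the window is nonempty; it loses its head and gains row[i]
      have hcons : win row k i
          = row[i - k]'(by omega) :: ((row.drop (i - k + 1)).take (k - 1)) := by
        unfold win
        rw [show i - (i - k) = k from by omega,
          List.drop_eq_getElem_cons (show i - k < row.length from by omega),
          List.take_cons hk1]
      have hw' : win row k (i + 1) = ((row.drop (i - k + 1)).take (k - 1)) ++ [row[i]] := by
        unfold win
        rw [show i + 1 - k = i - k + 1 from by omega,
          show i + 1 - (i - k + 1) = k from by omega]
        have htk := List.take_succ_eq_append_getElem
          (l := row.drop (i - k + 1)) (i := k - 1)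
          (by rw [List.length_drop]; omega)
        rw [show (k - 1) + 1 = k from by omega] at htk
        rw [htk, List.getElem_drop]
        simp only [show i - k + 1 + (k - 1) = i from by omega]
      conv_rhs => rw [← candEq (win row k (i + 1))]
      rw [hcons, hw', stat1_cons, stat2_cons, stat1_append, stat2_append]
      by_cases hy : row[i - k]'(by omega) = 0 <;> by_cases hx : row[i] = 0 <;>
        simp [bStep, hget, hyget, hy, hx, hpp, hem', maxstep, fdiv_cancel',
          fdiv_cancel_mid, mul_comm, mul_left_comm]

-- B's loop invariant
theorem bInv (row : List Int) (n k : Nat) (hk : k ≤ n) (hn : n ≤ row.length) (g : Int)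
    (i : Nat) (hi : i ≤ n) :
    (PySem.List.pyRange 0 (i : Int) 1).foldl (bStep row (k : Int)) (1, 0, g)
      = (stat1 (win row k i), stat2 (win row k i), (cands row i k).foldl maxstep g) := by
  induction i with
  | zero => simp [win, cands, stat1, stat2, PySem.List.pyRange_one_eq_nil]
  | succ i ih =>
    have hi' : i ≤ n := by omega
    have hcast : ((i + 1 : Nat) : Int) = (i : Int) + 1 := by push_cast; ring
    rw [hcast, PySem.List.pyRange_one_succ_right (by positivity), List.foldl_append, ih hi',
      List.foldl_cons, List.foldl_nil, bStep_eq row n k hk hn i (by omega) _]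
    -- align the best component with the cands fold
    refine congrArg _ (congrArg _ ?_)
    by_cases hki : k ≤ i + 1
    · have hwin : win row k (i + 1) = (row.drop (i + 1 - k)).take k := by
        unfold win; congr 1; omega
      have hc : cands row (i + 1) k
          = cands row i k ++ [((row.drop (i + 1 - k)).take k).prod] := by
        unfold cands
        rw [show (i + 1) - (k - 1) = (i - (k - 1)) + 1 by omega, List.range'_concat,
          List.map_append, show (k - 1) + 1 * (i - (k - 1)) = i by omega]
        rfl
      rw [if_pos hki, hc, List.foldl_append, List.foldl_cons, List.foldl_nil, hwin]
    · rw [if_neg hki]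
      unfold cands
      rw [show (i + 1) - (k - 1) = i - (k - 1) by omega]

-- B's per-row sliding window equals the same fold
theorem bRow_eq (row : List Int) (n k : Nat) (g : Int) (hk : k ≤ n) (hn : n ≤ row.length) :
    ((PySem.List.pyRange 0 (n : Int) 1).foldl (bStep row (k : Int)) (1, 0, g)).2.2
      = (cands row n k).foldl maxstep g := by
  rw [bInv row n k hk hn g n (le_refl n)]

-- ===== VERDICT (by name: the statement is the Claim_ definition above) =====
theorem greatest_product_of_row_spec : Claim_equal_greatest_product_of_row := by
  intro matrix adjacent _ hpre
  obtain ⟨hadj, hrows⟩ := hpre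
  unfold Spec_greatest_product_of_row greatest_product_of_row greatest_product_of_row_alt
  by_cases hbig : adjacent > (matrix.length : Int)
  · rw [if_pos hbig]
    have hstop : ∀ (row : List Int) (g : Int),
        aNumLoop row (matrix.length : Int) adjacent
          (PySem.List.pyRange 0 (matrix.length : Int) 1) g = g := by
      intro row g
      by_cases h0 : (0 : Int) < (matrix.length : Int)
      · rw [PySem.List.pyRange_one_cons h0, aNumLoop, if_pos (by omega)]
      · rw [PySem.List.pyRange_one_eq_nil (by omega)]; rfl
    calc (PySem.List.pyRange 0 (matrix.length : Int) 1).foldl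
          (fun g col => aNumLoop (PySem.List.pyGetD matrix col []) (matrix.length : Int)
            adjacent (PySem.List.pyRange 0 (matrix.length : Int) 1) g) 0
        = (PySem.List.pyRange 0 (matrix.length : Int) 1).foldl (fun g _ => g) 0 :=
          PySem.List.foldl_congr_mem _ _ _ _ (fun acc x _ => hstop _ acc)
      _ = 0 := foldl_id _ _
  · rw [if_neg hbig]
    have hkn : adjacent.toNat ≤ matrix.length := by omega
    have hadjc : adjacent = (adjacent.toNat : Int) := by omega
    have hlen : ∀ row ∈ matrix, matrix.length ≤ row.length := hrows (by omega)
    rw [PySem.List.foldl_pyRange_zero_pyGetD' matrix []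
      (fun g row => aNumLoop row (matrix.length : Int) adjacent
        (PySem.List.pyRange 0 (matrix.length : Int) 1) g) 0]
    refine PySem.List.foldl_congr_mem _ _ _ _ ?_
    intro acc row hrow
    rw [hadjc, aRow_eq row matrix.length adjacent.toNat acc hkn (hlen row hrow),
      bRow_eq row matrix.length adjacent.toNat acc hkn (hlen row hrow)]
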